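-- pv_equiv track=rewrite | github.com/WhizHack-Tech/package_building_testing | frontend/grouping_epoch_time.py | group_time_by_3_hours
-- ===== SOURCE A (Python) =====
-- def group_time_by_3_hours(start_time, end_time):
--
--     # Calculate the total number of 3-hour intervals
--     total_intervals = (end_time - start_time) // (3 * 60 * 60 * 1000)
--
--     # Initialize the result list
--     result = []
--
--     # Generate start and end times for each 3-hour interval
--     for i in range(total_intervals):
--         interval_start = start_time + (i * 3 * 60 * 60 * 1000)
--         interval_end = interval_start + (3 * 60 * 60 * 1000)
--         result.append((interval_start, interval_end))
--
--     return result
-- ===== SOURCE B (Python) =====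
-- def group_time_by_3_hours(start_time, end_time):
--     # Recursively peel off one 3-hour interval at a time: if less than 3 hours
--     # remain, there is no interval; otherwise emit the first interval and recurse
--     # on the rest of the range. No division or index arithmetic is needed.
--     step = 3 * 60 * 60 * 1000
--     if end_time - start_time < step:
--         return []
--     return [(start_time, start_time + step)] + group_time_by_3_hours(start_time + step, end_time)
-- ===== Notes on version B (the rewrite author's own statement) =====
-- stated objective: alternative
-- what changed: B is recursive with no division and no index arithmetic: it peels one 3-hour interval off the front of the range and recurses on the remainder until less than 3 hours remain, instead of precomputing the interval count with floor division and generating each interval from its index in a loop.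
import Mathlib
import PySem

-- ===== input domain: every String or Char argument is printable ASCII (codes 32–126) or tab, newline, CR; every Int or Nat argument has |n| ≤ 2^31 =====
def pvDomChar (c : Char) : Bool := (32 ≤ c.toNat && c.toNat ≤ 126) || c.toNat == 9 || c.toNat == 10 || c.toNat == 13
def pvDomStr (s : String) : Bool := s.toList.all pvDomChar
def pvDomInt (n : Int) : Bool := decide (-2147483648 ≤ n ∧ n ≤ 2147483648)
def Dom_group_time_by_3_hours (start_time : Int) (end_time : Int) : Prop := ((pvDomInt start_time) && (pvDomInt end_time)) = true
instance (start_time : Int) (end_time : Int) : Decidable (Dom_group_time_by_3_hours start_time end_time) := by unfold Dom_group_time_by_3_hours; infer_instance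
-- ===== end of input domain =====

-- B recursively peels one 3-hour interval off the front of the range until less than
-- 3 hours remain, with no division and no index arithmetic (alternative decomposition; same cost).

-- ===== PORT A =====
def group_time_by_3_hours (start_time : Int) (end_time : Int) : List (Int × Int) :=
  let total_intervals : Int := PySem.Int.floordiv (end_time - start_time) (3 * 60 * 60 * 1000)
  (PySem.List.pyRange 0 total_intervals 1).foldl (fun result i =>
    let interval_start := start_time + (i * 3 * 60 * 60 * 1000)
    let interval_end := interval_start + (3 * 60 * 60 * 1000)
    result ++ [(interval_start, interval_end)]) []

-- ===== PORT B =====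
def group_time_by_3_hours_alt (start_time : Int) (end_time : Int) : List (Int × Int) :=
  if end_time - start_time < 10800000 then []
  else (start_time, start_time + 10800000) :: group_time_by_3_hours_alt (start_time + 10800000) end_time
termination_by (end_time - start_time).toNat
decreasing_by omega

-- ===== PRECONDITION & SPEC =====
def Spec_group_time_by_3_hours (start_time : Int) (end_time : Int) (out : List (Int × Int)) : Prop := out = group_time_by_3_hours_alt start_time end_time
instance (start_time : Int) (end_time : Int) (out : List (Int × Int)) : Decidable (Spec_group_time_by_3_hours start_time end_time out) := by unfold Spec_group_time_by_3_hours; infer_instance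

-- ===== CLAIM =====
def Claim_equal_group_time_by_3_hours : Prop := ∀ (start_time : Int) (end_time : Int), Dom_group_time_by_3_hours start_time end_time → Spec_group_time_by_3_hours start_time end_time (group_time_by_3_hours start_time end_time)

-- ===== LEMMAS AND PROOFS =====

-- A's append-fold is the map of the interval constructor over the index range.
theorem pv_foldl_append_map {α β : Type} (f : α → β) (l : List α) (acc : List β) :
    l.foldl (fun r i => r ++ [f i]) acc = acc ++ l.map f := by
  induction l generalizing acc with
  | nil => simp
  | cons x xs ih => simp [List.foldl, ih]

-- B's recursion produces exactly the indexed intervals, counted by floor division.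
theorem pv_alt_eq (m : Nat) : ∀ (s e : Int),
    (PySem.Int.floordiv (e - s) 10800000).toNat = m →
    group_time_by_3_hours_alt s e
      = (List.range m).map (fun (k : Nat) => ((s + (k : Int) * 10800000, s + (k : Int) * 10800000 + 10800000) : Int × Int)) := by
  induction m with
  | zero =>
    intro s e h
    have hf : PySem.Int.floordiv (e - s) 10800000 = (e - s) / 10800000 :=
      PySem.Int.floordiv_eq_ediv_of_pos (by norm_num)
    rw [hf] at h
    have hlt : e - s < 10800000 := by omega
    rw [group_time_by_3_hours_alt, if_pos hlt]
    simp
  | succ m ih =>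
    intro s e h
    have hf : PySem.Int.floordiv (e - s) 10800000 = (e - s) / 10800000 :=
      PySem.Int.floordiv_eq_ediv_of_pos (by norm_num)
    rw [hf] at h
    have hge : ¬ (e - s < 10800000) := by omega
    rw [group_time_by_3_hours_alt, if_neg hge]
    have hrec : (PySem.Int.floordiv (e - (s + 10800000)) 10800000).toNat = m := by
      rw [PySem.Int.floordiv_eq_ediv_of_pos (by norm_num : (0:Int) < 10800000)]
      omega
    rw [ih (s + 10800000) e hrec]
    rw [List.range_succ_eq_map]
    simp only [List.map_cons, List.map_map]
    congr 1
    · simp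
    · apply List.map_congr_left
      intro k _
      simp only [Function.comp_apply, Nat.succ_eq_add_one, Prod.mk.injEq]
      push_cast
      constructor <;> ring

-- ===== VERDICT =====
theorem group_time_by_3_hours_spec : Claim_equal_group_time_by_3_hours := by
  intro s e _
  unfold Spec_group_time_by_3_hours group_time_by_3_hours
  simp only [PySem.List.pyRange_one]
  set n : Int := PySem.Int.floordiv (e - s) (3 * 60 * 60 * 1000) with hn
  rw [pv_foldl_append_map]
  have h1 : (n - 0).toNat = n.toNat := by omega
  rw [h1, List.map_map]
  rw [pv_alt_eq n.toNat s e (by norm_num at hn ⊢; omega)]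
  apply List.map_congr_left
  intro k _
  simp only [Function.comp_apply, Prod.mk.injEq]
  constructor <;> push_cast <;> ring
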